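-- pv_equiv track=rewrite | github.com/mojaeya/algorithm-gaepum | solve/0520_대충 만든 자판/postforty/대충 만든 자판.py | solution
-- ===== SOURCE A (Python) =====
-- def solution(keymap, targets):
--     def func(k, t):
--         result = []
--         for i in t:
--             result.append(k.find(i) + 1 if k.find(i) >= 0 else -1)
--         return result
--
--     t_lst = []
--     for t in targets:
--         k_lst = []
--         for k in keymap:
--             k_lst.append(func(k, t))
--         rst = 0
--         for x in zip(*k_lst):
--             # keymap으로 targets을 구현할 수 없는 경우
--             if -1 in x and len(set(x)) == 1:
--                 rst = -1
--                 break
--             # keymap으로 targets을 구현할 수 있는 경우 -1을 제외 후 최소 클릭 값 누적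
--             else:
--                 rst += min(filter(lambda n: n != -1, x))
--         t_lst.append(rst)
--
--     return t_lst
-- ===== SOURCE B (Python) =====
-- def solution(keymap, targets):
--     # Build once: for each character, the minimal first-press count over all keys.
--     best = {}
--     for k in keymap:
--         for i, ch in enumerate(k):
--             if ch not in best or i < best[ch]:
--                 best[ch] = i
--
--     def cost(t):
--         total = 0
--         for ch in t:
--             if ch not in best:
--                 return -1
--             total += best[ch] + 1
--         return total
--
--     return [cost(t) for t in targets]
-- ===== Notes on version B (the rewrite author's own statement) =====
-- stated objective: faster
-- what changed: Instead of re-scanning every keymap string for every character of every target and transposing per-keymap result rows, B precomputes once a dict mapping each character to its minimal first index over all keymap strings, then costs each target in a single pass.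
-- intended difference: With an empty keymap and a nonempty target, A returns 0 for that target (its zip(*[]) loop body never runs) although the target cannot be typed at all; B returns the intended -1. — e.g. on solution([], ["a"]): A returns [0], B returns [-1]
import Mathlib
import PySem

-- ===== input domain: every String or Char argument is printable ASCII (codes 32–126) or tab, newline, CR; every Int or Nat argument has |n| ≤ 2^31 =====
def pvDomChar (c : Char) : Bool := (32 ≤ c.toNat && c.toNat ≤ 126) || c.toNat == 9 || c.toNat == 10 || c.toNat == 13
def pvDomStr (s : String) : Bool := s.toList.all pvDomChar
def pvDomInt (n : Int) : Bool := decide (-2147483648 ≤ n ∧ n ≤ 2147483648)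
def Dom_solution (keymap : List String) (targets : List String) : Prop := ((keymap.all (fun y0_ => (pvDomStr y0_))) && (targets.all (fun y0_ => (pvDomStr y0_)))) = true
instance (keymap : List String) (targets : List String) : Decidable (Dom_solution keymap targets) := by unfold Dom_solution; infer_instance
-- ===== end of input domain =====

-- B replaces A's per-target scan of every keymap string by one precomputed map
-- char ↦ minimal first index over all keymap strings, then a single pass per target.
-- (Timed objective: asymptotically fewer character comparisons.)

-- ===== PORT A =====

-- helper 'func(k, t)': per char of t, k.find(ch)+1 if found else -1
def pvFunc (k : String) (t : String) : List Int :=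
  t.toList.foldl
    (fun result i =>
      result ++ [if (0:Int) ≤ PySem.Str.find k (String.ofList [i])
                 then PySem.Str.find k (String.ofList [i]) + 1 else -1]) []

-- zip(*rows): Python's zip of the rows (zip() of no arguments is empty).
-- The Nat argument is pure fuel (the length of the first row bounds the number of
-- rounds, since that row loses its head each round); it guards termination only.
def pvZipGo : Nat → List (List Int) → List (List Int)
  | 0, _ => []
  | fuel + 1, rows =>
    if rows.all (fun r => !r.isEmpty) then
      rows.map (fun r => r.headD 0) :: pvZipGo fuel (rows.map List.tail)
    else []

def pvZipStar (rows : List (List Int)) : List (List Int) :=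
  if rows.isEmpty then [] else pvZipGo (rows.headD []).length rows

-- the 'for x in zip(*k_lst)' loop with its break (break returns -1 immediately)
-- min() of an empty iterable would raise in Python; that point is unreachable
-- (the all-(-1) branch catches it), so the .getD 0 default is never used.
def pvLoopCols : List (List Int) → Int → Int
  | [], rst => rst
  | x :: xs, rst =>
    if (-1 : Int) ∈ x ∧ (PySem.Set.ofList x).length = 1 then -1
    else pvLoopCols xs (rst + (PySem.List.min? (x.filter (fun n => n ≠ -1)) id).getD 0)

def solution (keymap : List String) (targets : List String) : List Int :=
  targets.foldl
    (fun t_lst t =>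
      let k_lst := keymap.foldl (fun k_lst k => k_lst ++ [pvFunc k t]) []
      t_lst ++ [pvLoopCols (pvZipStar k_lst) 0]) []

-- ===== PORT B =====

-- inner 'for i, ch in enumerate(k)' loop updating the best-first-index dict
def pvScanKey : PySem.Dict Char Int → Int → List Char → PySem.Dict Char Int
  | d, _, [] => d
  | d, i, ch :: cs =>
    pvScanKey
      (match d.get? ch with
       | none => d.insert ch i
       | some v => if i < v then d.insert ch i else d) (i + 1) cs

-- 'cost(t)': walk t once, early return -1 on a char no key carries
def pvTypeCost (best : PySem.Dict Char Int) : List Char → Int → Int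
  | [], total => total
  | ch :: cs, total =>
    match best.get? ch with
    | none => -1
    | some v => pvTypeCost best cs (total + (v + 1))

def solution_alt (keymap : List String) (targets : List String) : List Int :=
  let best := keymap.foldl (fun d k => pvScanKey d 0 k.toList) PySem.Dict.empty
  targets.map (fun t => pvTypeCost best t.toList 0)

-- ===== PRECONDITION & SPEC =====

-- With an EMPTY keymap and a nonempty target, A returns 0 (its zip(*[]) loop body
-- never runs), although the target cannot be typed at all; B returns the intended -1.
def D_solution (keymap : List String) (targets : List String) : Prop :=
  keymap = [] ∧ ∃ t ∈ targets, t ≠ ""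
instance (keymap : List String) (targets : List String) : Decidable (D_solution keymap targets) := by
  unfold D_solution; infer_instance

def Spec_solution (keymap : List String) (targets : List String) (out : List Int) : Prop :=
  ¬ D_solution keymap targets → out = solution_alt keymap targets
instance (keymap : List String) (targets : List String) (out : List Int) : Decidable (Spec_solution keymap targets out) := by
  unfold Spec_solution; infer_instance

def pvDiffWitness_solution : List String × List String := ([], ["a"])
def pvDiffWitnessOut_solution : (List Int) × (List Int) := ([0], [-1])

-- ===== CLAIM (what is proved, stated in full; the proofs are below) =====
def Claim_unchanged_solution : Prop := ∀ (keymap : List String) (targets : List String), Dom_solution keymap targets → Spec_solution keymap targets (solution keymap targets)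
def Claim_changed_solution : Prop := Dom_solution (pvDiffWitness_solution.1) (pvDiffWitness_solution.2) ∧ D_solution (pvDiffWitness_solution.1) (pvDiffWitness_solution.2) ∧ solution (pvDiffWitness_solution.1) (pvDiffWitness_solution.2) = pvDiffWitnessOut_solution.1 ∧ solution_alt (pvDiffWitness_solution.1) (pvDiffWitness_solution.2) = pvDiffWitnessOut_solution.2 ∧ pvDiffWitnessOut_solution.1 ≠ pvDiffWitnessOut_solution.2
def Claim_exact_solution : Prop := ∀ (keymap : List String) (targets : List String), Dom_solution keymap targets → D_solution keymap targets → solution keymap targets ≠ solution_alt keymap targets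

-- ===== LEMMAS AND PROOFS =====

-- the minimum of two optional values (none = no value)
def pvOptMin : Option Int → Option Int → Option Int
  | none, b => b
  | a, none => a
  | some x, some y => some (min x y)

-- spec value: minimal first index of c over the keymap, as one optMin fold
def pvBest (keymap : List String) (c : Char) : Option Int :=
  keymap.foldl (fun o k => pvOptMin o ((PySem.List.index? k.toList c).map (fun n => (n : Int)))) none

-- a one-char list is a prefix iff it is the head
lemma pvPrefix_singleton (c : Char) (xs : List Char) : [c] <+: xs ↔ xs.head? = some c := by
  cases xs with
  | nil => simp
  | cons x t => simp [List.cons_prefix_cons, eq_comm]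

-- s.find(c) for a single character c is the first index of c (or -1)
lemma pvFind_singleton (l : List Char) (c : Char) :
    PySem.Chars.find l [c] = match PySem.List.index? l c with
      | none => (-1 : Int)
      | some n => (n : Int) := by
  cases h : PySem.List.index? l c with
  | none =>
    have hn : c ∉ l := (PySem.List.index?_eq_none_iff l c).mp h
    simp only []
    rw [PySem.Chars.find_eq_neg_one_iff]
    simpa [List.singleton_infix_iff] using hn
  | some n =>
    obtain ⟨hk, hget, hmin⟩ := PySem.List.getElem_of_index?_eq_some h
    have hmem : c ∈ l := List.mem_of_getElem hget
    have hnn : (0:Int) ≤ PySem.Chars.find l [c] := by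
      rw [PySem.Chars.find_nonneg_iff, List.singleton_infix_iff]; exact hmem
    obtain ⟨hpre, hminf⟩ := PySem.Chars.find_spec (s := l) (sub := [c]) hnn
    rw [pvPrefix_singleton, List.head?_drop] at hpre
    have hne : (PySem.Chars.find l [c]).toNat = n := by
      rcases lt_trichotomy (PySem.Chars.find l [c]).toNat n with hlt | heq | hgt
      · have := hmin _ hlt
        have hlt2 : (PySem.Chars.find l [c]).toNat < l.length := lt_trans hlt hk
        simp [List.getElem?_eq_getElem hlt2] at hpre
        exact absurd hpre this
      · exact heq
      · exact absurd (by rw [pvPrefix_singleton, List.head?_drop,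
          List.getElem?_eq_getElem hk, hget]) (hminf n hgt)
    simp only []
    omega

lemma pvOptMin_none_right (a : Option Int) : pvOptMin a none = a := by cases a <;> rfl

lemma pvOptMin_assoc (a b c : Option Int) : pvOptMin (pvOptMin a b) c = pvOptMin a (pvOptMin b c) := by
  cases a <;> cases b <;> cases c <;> simp [pvOptMin, min_assoc]

-- A's per-char value, closed form
lemma pvFunc_cell (k : String) (c : Char) :
    (if (0:Int) ≤ PySem.Str.find k (String.ofList [c])
     then PySem.Str.find k (String.ofList [c]) + 1 else -1)
    = match PySem.List.index? k.toList c with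
      | none => -1
      | some n => (n : Int) + 1 := by
  have hb : PySem.Str.find k (String.ofList [c]) = PySem.Chars.find k.toList [c] := by
    simp
  rw [hb, pvFind_singleton]
  cases PySem.List.index? k.toList c with
  | none => simp
  | some n => simp

lemma pvFunc_eq_map (k t : String) :
    pvFunc k t = t.toList.map (fun c =>
      match PySem.List.index? k.toList c with
      | none => (-1 : Int)
      | some n => (n : Int) + 1) := by
  unfold pvFunc
  rw [PySem.List.foldl_append_singleton_eq_map]
  simp only [List.nil_append]
  exact List.map_congr_left (fun c _ => pvFunc_cell k c)

lemma pvZipGo_map {α : Type} (cols : List Char) (l : List α) (hl : l ≠ []) (f : α → Char → Int) :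
    pvZipGo cols.length (l.map (fun a => cols.map (fun c => f a c)))
      = cols.map (fun c => l.map (fun a => f a c)) := by
  induction cols generalizing l with
  | nil => simp [pvZipGo]
  | cons c cs ih =>
    have hall : (l.map (fun a => (c :: cs).map (fun c => f a c))).all (fun r => !r.isEmpty) = true := by
      simp
    simp only [List.length_cons, pvZipGo, hall, if_pos]
    congr 1
    · simp [List.map_map, Function.comp]
    · have h2 : (l.map (fun a => (c :: cs).map (fun c => f a c))).map List.tail
          = l.map (fun a => cs.map (fun c => f a c)) := by
        simp [List.map_map, Function.comp]
      rw [h2, ih l hl]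

-- transpose of a nonempty rectangular family of rows
lemma pvZipStar_map {α : Type} (l : List α) (hl : l ≠ []) (cols : List Char) (f : α → Char → Int) :
    pvZipStar (l.map (fun a => cols.map (fun c => f a c)))
      = cols.map (fun c => l.map (fun a => f a c)) := by
  obtain ⟨a, l', rfl⟩ := List.exists_cons_of_ne_nil hl
  unfold pvZipStar
  simp only [List.map_cons, List.isEmpty_cons, List.headD_cons, List.length_map]
  exact pvZipGo_map cols (a :: l') (by simp) f

-- B's dict lookup after scanning one key
lemma pvScanKey_get? (cs : List Char) (d : PySem.Dict Char Int) (i : Int) (c : Char) :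
    (pvScanKey d i cs).get? c
      = pvOptMin (d.get? c) ((PySem.List.index? cs c).map (fun n => i + (n : Int))) := by
  induction cs generalizing d i with
  | nil => simp [pvScanKey, pvOptMin_none_right]
  | cons ch cs ih =>
    simp only [pvScanKey]
    rw [ih]
    by_cases hc : c = ch
    · subst hc
      rw [PySem.List.index?_cons_self]
      have hd : ((match d.get? c with
          | none => d.insert c i
          | some v => if i < v then d.insert c i else d) : PySem.Dict Char Int).get? c
            = pvOptMin (d.get? c) (some i) := by
        cases hdc : d.get? c with
        | none => simp [PySem.Dict.get?_insert_self, pvOptMin]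
        | some v =>
          by_cases hiv : i < v
          · simp [hiv, PySem.Dict.get?_insert_self, pvOptMin, min_comm,
              min_eq_left (le_of_lt hiv)]
          · simp [hiv, hdc, pvOptMin, min_eq_left (le_of_not_gt hiv)]
      rw [hd, pvOptMin_assoc]
      congr 1
      cases hix : PySem.List.index? cs c with
      | none => simp [pvOptMin]
      | some n => simp [pvOptMin, Option.map_some]; omega
    · rw [PySem.List.index?_cons_of_ne _ (fun h => hc h.symm)]
      have hd : ((match d.get? ch with
          | none => d.insert ch i
          | some v => if i < v then d.insert ch i else d) : PySem.Dict Char Int).get? c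
            = d.get? c := by
        cases d.get? ch with
        | none => exact PySem.Dict.get?_insert_of_ne _ _ hc
        | some v =>
          by_cases hiv : i < v
          · simp [hiv, PySem.Dict.get?_insert_of_ne _ _ hc]
          · simp [hiv]
      rw [hd]
      congr 1
      cases PySem.List.index? cs c with
      | none => rfl
      | some n => simp [Option.map_some]; omega

-- B's dict lookup = the optMin fold
lemma pvBest_get? (keymap : List String) (c : Char) :
    (keymap.foldl (fun d k => pvScanKey d 0 k.toList) PySem.Dict.empty).get? c = pvBest keymap c := by
  have gen : ∀ (l : List String) (d : PySem.Dict Char Int),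
      (l.foldl (fun d k => pvScanKey d 0 k.toList) d).get? c
        = l.foldl (fun o k => pvOptMin o ((PySem.List.index? k.toList c).map (fun n => (n : Int)))) (d.get? c) := by
    intro l
    induction l with
    | nil => intro d; rfl
    | cons k l ih =>
      intro d
      simp only [List.foldl_cons]
      rw [ih, pvScanKey_get?]
      congr 1
      cases PySem.List.index? k.toList c with
      | none => rfl
      | some n => simp
  rw [gen, pvBest]
  rfl

-- fold characterisations
lemma pvOptMin_fold_none (vs : List (Option Int)) (a : Option Int) :
    vs.foldl pvOptMin a = none ↔ a = none ∧ ∀ o ∈ vs, o = none := by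
  induction vs generalizing a with
  | nil => simp
  | cons o vs ih =>
    simp only [List.foldl_cons, ih, List.mem_cons]
    constructor
    · rintro ⟨h1, h2⟩
      cases a <;> cases o <;> simp_all [pvOptMin] <;> exact h2
    · rintro ⟨ha, h2⟩
      subst ha
      refine ⟨by simp [pvOptMin, h2 o (Or.inl rfl)], fun x hx => h2 x (Or.inr hx)⟩

lemma pvOptMin_fold_some (vs : List (Option Int)) (a : Option Int) (v : Int)
    (h : vs.foldl pvOptMin a = some v) :
    (a = some v ∨ some v ∈ vs) ∧ (∀ w, a = some w → v ≤ w) ∧ (∀ w, some w ∈ vs → v ≤ w) := by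
  induction vs generalizing a with
  | nil =>
    simp only [List.foldl_nil] at h
    exact ⟨Or.inl h, fun w hw => by simp [h] at hw; omega, by simp⟩
  | cons o vs ih =>
    simp only [List.foldl_cons] at h
    obtain ⟨h1, h2, h3⟩ := ih _ h
    constructor
    · rcases h1 with h1 | h1
      · cases a <;> cases o <;> simp_all [pvOptMin]
        rcases min_cases ‹Int› ‹Int› with ⟨hm, _⟩ | ⟨hm, _⟩ <;> simp_all <;> omega
      · exact Or.inr (List.mem_cons_of_mem _ h1)
    constructor
    · intro w hw
      subst hw
      have := h2
      cases o with
      | none => exact h2 w rfl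
      | some y =>
        have := h2 (min w y) (by simp [pvOptMin])
        omega
    · intro w hw
      rcases List.mem_cons.mp hw with hw | hw
      · cases a with
        | none => exact h2 w hw.symm
        | some x =>
          have := h2 (min x w) (by simp [pvOptMin, ← hw])
          omega
      · exact h3 w hw

-- set() of a constant nonempty list is one element
lemma pvOfList_const (x : List Int) (hx : x ≠ []) (hall : ∀ a ∈ x, a = -1) :
    PySem.Set.ofList x = [-1] := by
  induction x with
  | nil => simp at hx
  | cons a t ih =>
    have ha : a = -1 := hall a List.mem_cons_self
    subst ha
    rw [PySem.Set.ofList_cons]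
    by_cases ht : t = []
    · subst ht; rfl
    · rw [ih ht (fun b hb => hall b (List.mem_cons_of_mem _ hb))]
      rfl

-- "-1 in x and len(set(x)) == 1" means: every entry is -1
lemma pvAllNeg (x : List Int) (hx : x ≠ []) :
    ((-1 : Int) ∈ x ∧ (PySem.Set.ofList x).length = 1) ↔ ∀ a ∈ x, a = -1 := by
  constructor
  · rintro ⟨hmem, hlen⟩ a ha
    obtain ⟨b, hb⟩ := List.length_eq_one_iff.mp hlen
    have h1 : (-1 : Int) ∈ PySem.Set.ofList x := (PySem.Set.mem_ofList _ _).mpr hmem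
    have h2 : a ∈ PySem.Set.ofList x := (PySem.Set.mem_ofList _ _).mpr ha
    rw [hb] at h1 h2
    simp at h1 h2
    omega
  · intro hall
    refine ⟨?_, by rw [pvOfList_const x hx hall]; rfl⟩
    obtain ⟨a, t, rfl⟩ := List.exists_cons_of_ne_nil hx
    have := hall a List.mem_cons_self
    simp [this]

-- the column test matches B's lookup being none
lemma pvCol_none (keymap : List String) (c : Char) :
    (∀ a ∈ keymap.map (fun k =>
        match PySem.List.index? k.toList c with
        | none => (-1 : Int)
        | some n => (n : Int) + 1), a = -1) ↔ pvBest keymap c = none := by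
  rw [pvBest, ← List.foldl_map, pvOptMin_fold_none]
  simp only [true_and]
  constructor
  · intro h o ho
    obtain ⟨k, hk, rfl⟩ := List.mem_map.mp ho
    have h1 := h _ (List.mem_map.mpr ⟨k, hk, rfl⟩)
    cases hix : PySem.List.index? k.toList c with
    | none => rfl
    | some n =>
      rw [hix] at h1
      have h2 : (n : Int) + 1 = -1 := h1
      omega
  · intro h a ha
    obtain ⟨k, hk, rfl⟩ := List.mem_map.mp ha
    have h1 := h _ (List.mem_map.mpr ⟨k, hk, rfl⟩)
    cases hix : PySem.List.index? k.toList c with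
    | none => rfl
    | some n =>
      rw [hix] at h1
      have h2 : some ((n : Int)) = none := h1
      exact absurd h2 (by simp)

-- the column minimum matches B's lookup value + 1
lemma pvCol_min (keymap : List String) (c : Char) (v : Int) (hv : pvBest keymap c = some v) :
    (PySem.List.min? ((keymap.map (fun k =>
        match PySem.List.index? k.toList c with
        | none => (-1 : Int)
        | some n => (n : Int) + 1)).filter (fun n => n ≠ -1)) id).getD 0 = v + 1 := by
  rw [pvBest, ← List.foldl_map] at hv
  obtain ⟨h1, _, h3⟩ := pvOptMin_fold_some _ _ _ hv
  rcases h1 with h1 | h1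
  · exact absurd h1 (by simp)
  obtain ⟨ov, hov, hveq⟩ := List.mem_map.mp h1
  have hv0 : 0 ≤ v := by
    cases hix : PySem.List.index? ov.toList c with
    | none =>
      rw [hix] at hveq
      exact absurd hveq (by simp)
    | some n =>
      rw [hix] at hveq
      have h2 : (n : Int) = v := Option.some.inj hveq
      omega
  have hmemL : v + 1 ∈ (keymap.map (fun k =>
      match PySem.List.index? k.toList c with
      | none => (-1 : Int)
      | some n => (n : Int) + 1)).filter (fun n => n ≠ -1) := by
    rw [List.mem_filter]
    constructor
    · apply List.mem_map.mpr
      refine ⟨ov, hov, ?_⟩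
      cases hix : PySem.List.index? ov.toList c with
      | none =>
        rw [hix] at hveq
        exact absurd hveq (by simp)
      | some n =>
        rw [hix] at hveq
        have h2 : (n : Int) = v := Option.some.inj hveq
        show (n : Int) + 1 = v + 1
        omega
    · simp
      omega
  have hlb : ∀ a ∈ (keymap.map (fun k =>
      match PySem.List.index? k.toList c with
      | none => (-1 : Int)
      | some n => (n : Int) + 1)).filter (fun n => n ≠ -1), v + 1 ≤ a := by
    intro a ha
    rw [List.mem_filter] at ha
    obtain ⟨hax, hane⟩ := ha
    obtain ⟨k, hk, rfl⟩ := List.mem_map.mp hax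
    cases hix : PySem.List.index? k.toList c with
    | none =>
      rw [hix] at hane
      simp at hane
    | some n =>
      have hn : some ((n : Int)) ∈ keymap.map
          (fun k => (PySem.List.index? k.toList c).map (fun n => (n : Int))) :=
        List.mem_map.mpr ⟨k, hk, by rw [hix]; rfl⟩
      have := h3 _ hn
      show v + 1 ≤ (n : Int) + 1
      omega
  cases hm : PySem.List.min? ((keymap.map (fun k =>
      match PySem.List.index? k.toList c with
      | none => (-1 : Int)
      | some n => (n : Int) + 1)).filter (fun n => n ≠ -1)) id with
  | none =>
    rw [(PySem.List.min?_eq_none_iff _ _).mp hm] at hmemL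
    exact absurd hmemL (by simp)
  | some m =>
    have hmem := PySem.List.min?_mem hm
    have hmin := PySem.List.min?_isMin hm
    have hb1 := hlb m hmem
    have hb2 := hmin _ hmemL
    simp only [id] at hb2
    simp only [Option.getD_some]
    omega

-- per-target equality for a nonempty keymap
lemma pvTarget_eq (keymap : List String) (hk : keymap ≠ []) (cs : List Char) (acc : Int) :
    pvLoopCols (cs.map (fun c => keymap.map (fun k =>
        match PySem.List.index? k.toList c with
        | none => (-1 : Int)
        | some n => (n : Int) + 1))) acc
      = pvTypeCost (keymap.foldl (fun d k => pvScanKey d 0 k.toList) PySem.Dict.empty) cs acc := by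
  induction cs generalizing acc with
  | nil => rfl
  | cons c cs ih =>
    simp only [List.map_cons, pvLoopCols, pvTypeCost]
    have hxne : keymap.map (fun k =>
        match PySem.List.index? k.toList c with
        | none => (-1 : Int)
        | some n => (n : Int) + 1) ≠ [] := by
      simpa using hk
    rw [pvBest_get?]
    cases hb : pvBest keymap c with
    | none =>
      rw [if_pos]
      rw [pvAllNeg _ hxne, pvCol_none]
      exact hb
    | some v =>
      rw [if_neg, pvCol_min keymap c v hb, ih]
      rw [pvAllNeg _ hxne, pvCol_none, hb]
      simp

-- ===== VERDICT (by name: the statement is the Claim_ definition above) =====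
theorem solution_spec : Claim_unchanged_solution := by
  intro keymap targets _ hnd
  unfold solution solution_alt
  simp only []
  rw [PySem.List.foldl_append_singleton_eq_map]
  simp only [List.nil_append]
  apply List.map_congr_left
  intro t ht
  by_cases hk : keymap = []
  · subst hk
    have ht0 : t = "" := by
      by_contra hne
      exact hnd ⟨rfl, t, ht, hne⟩
    subst ht0
    rfl
  · rw [PySem.List.foldl_append_singleton_eq_map]
    simp only [List.nil_append]
    have hfe : keymap.map (fun k => pvFunc k t)
        = keymap.map (fun k => t.toList.map (fun c =>
            match PySem.List.index? k.toList c with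
            | none => (-1 : Int)
            | some n => (n : Int) + 1)) :=
      List.map_congr_left (fun k _ => pvFunc_eq_map k t)
    rw [hfe, pvZipStar_map keymap hk t.toList
      (fun k c => match PySem.List.index? k.toList c with
        | none => (-1 : Int)
        | some n => (n : Int) + 1)]
    exact pvTarget_eq keymap hk t.toList 0

theorem solution_changed : Claim_changed_solution := by
  unfold Claim_changed_solution; decide

theorem solution_tight : Claim_exact_solution := by
  intro keymap targets _ hd heq
  obtain ⟨hk, t, ht, htne⟩ := hd
  subst hk
  unfold solution solution_alt at heq
  simp only [List.foldl_nil] at heq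
  rw [PySem.List.foldl_append_singleton_eq_map] at heq
  simp only [List.nil_append] at heq
  rw [List.map_eq_map_iff] at heq
  have := heq t ht
  obtain ⟨c, cs, hcs⟩ := List.exists_cons_of_ne_nil
    (fun h => htne (String.toList_eq_nil_iff.mp h))
  rw [hcs] at this
  simp [pvZipStar, pvLoopCols, pvTypeCost, PySem.Dict.get?_empty] at this
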